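-- pv_equiv track=rewrite | github.com/intel/AI-Playground | OpenVINO/openvino_adapter.py | convert_prompt
-- ===== SOURCE A (Python) =====
-- from typing import Dict, List, Callable
--
-- _default_prompt = {
--         "role": "system",
--         "content": "You are a helpful digital assistant. Please provide safe, ethical and accurate information to the user. Please keep the output text language the same as the user input.",
--     }
--
-- def convert_prompt(prompt: List[Dict[str, str]]):
--     chat_history = [_default_prompt]
--     prompt_len = prompt.__len__()
--     i = 0
--     while i < prompt_len:
--         chat_history.append({"role": "user", "content": prompt[i].get("question")})
--         if i < prompt_len - 1:
--             chat_history.append(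
--                 {"role": "assistant", "content": prompt[i].get("answer")}
--             )
--         i = i + 1
--     return chat_history
-- ===== SOURCE B (Python) =====
-- _default_prompt = {
--         "role": "system",
--         "content": "You are a helpful digital assistant. Please provide safe, ethical and accurate information to the user. Please keep the output text language the same as the user input.",
--     }
--
-- def convert_prompt(prompt):
--     # Staged construction: build the user messages and the assistant messages
--     # as two separate role-tagged lists (only the first len-1 answers are kept),
--     # zip them into question/answer rounds, and append the final lone question.
--     users = [{"role": "user", "content": it.get("question")} for it in prompt]
--     answers = [{"role": "assistant", "content": it.get("answer")} for it in prompt[:-1]]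
--     chat_history = [_default_prompt]
--     for u, a in zip(users, answers):
--         chat_history += [u, a]
--     if users:
--         chat_history.append(users[-1])
--     return chat_history
-- ===== Notes on version B (the rewrite author's own statement) =====
-- stated objective: alternative
-- what changed: Replaces A's single index-counting while loop with its per-iteration i<len-1 branch by staged construction: two separate comprehensions build the role-tagged user and assistant lists (answers truncated to len-1), a zip interleaves them into rounds, and the lone final question is appended afterwards.
import Mathlib
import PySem

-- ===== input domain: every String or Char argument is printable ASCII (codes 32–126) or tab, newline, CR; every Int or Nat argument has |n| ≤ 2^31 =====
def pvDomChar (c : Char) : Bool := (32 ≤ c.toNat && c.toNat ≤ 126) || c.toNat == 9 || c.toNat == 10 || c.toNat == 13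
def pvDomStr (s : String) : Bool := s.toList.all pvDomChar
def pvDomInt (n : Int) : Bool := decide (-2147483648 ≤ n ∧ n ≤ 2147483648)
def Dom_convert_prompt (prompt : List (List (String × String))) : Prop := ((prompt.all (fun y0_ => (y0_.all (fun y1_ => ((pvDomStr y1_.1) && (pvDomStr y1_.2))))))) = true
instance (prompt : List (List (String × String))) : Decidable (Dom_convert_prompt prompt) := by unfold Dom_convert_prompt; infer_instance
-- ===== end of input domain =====

-- B replaces A's index-counting while loop (with its per-iteration i < len-1 branch) by staged
-- construction: separate user/assistant lists, a zip interleaving them, and a final appended question.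


-- shared literal: the module-level _default_prompt dict
def pvSystemMsg : List (String × Option String) :=
  [("role", some "system"), ("content", some "You are a helpful digital assistant. Please provide safe, ethical and accurate information to the user. Please keep the output text language the same as the user input.")]

-- ===== PORT A =====
-- one iteration of A's while loop (i is the loop counter)
def pvStepA (prompt : List (List (String × String)))
    (hist : List (List (String × Option String))) (i : Int) : List (List (String × Option String)) :=
  let item := (PySem.List.pyGet? prompt i).getD []   -- prompt[i]; i is always in range in A's loop
  let hist := hist ++ [[("role", some "user"), ("content", (PySem.Dict.mk item).get? "question")]]
  if i < (prompt.length : Int) - 1 then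
    hist ++ [[("role", some "assistant"), ("content", (PySem.Dict.mk item).get? "answer")]]
  else hist

def convert_prompt (prompt : List (List (String × String))) : List (List (String × Option String)) :=
  (PySem.List.pyRange 0 (prompt.length : Int) 1).foldl (pvStepA prompt) [pvSystemMsg]

-- ===== PORT B =====
-- the two message constructors of Source B's comprehensions
def pvUserMsg (item : List (String × String)) : List (String × Option String) :=
  [("role", some "user"), ("content", (PySem.Dict.mk item).get? "question")]
def pvAnsMsg (item : List (String × String)) : List (String × Option String) :=
  [("role", some "assistant"), ("content", (PySem.Dict.mk item).get? "answer")]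

def convert_prompt_alt (prompt : List (List (String × String))) : List (List (String × Option String)) :=
  let users := prompt.map pvUserMsg
  let answers := (PySem.List.slice prompt none (some (-1))).map pvAnsMsg   -- prompt[:-1]
  let chat := (users.zip answers).foldl (fun acc p => acc ++ [p.1, p.2]) [pvSystemMsg]
  if users = [] then chat
  else chat ++ [(PySem.List.pyGet? users (-1)).getD []]   -- users[-1]; users ≠ [] here

-- ===== PRECONDITION & SPEC =====
def Spec_convert_prompt (prompt : List (List (String × String))) (out : List (List (String × Option String))) : Prop := out = convert_prompt_alt prompt
instance (prompt : List (List (String × String))) (out : List (List (String × Option String))) : Decidable (Spec_convert_prompt prompt out) := by unfold Spec_convert_prompt; infer_instance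

-- ===== CLAIM (what is proved, stated in full; the proofs are below) =====
def Claim_equal_convert_prompt : Prop := ∀ (prompt : List (List (String × String))), Dom_convert_prompt prompt → Spec_convert_prompt prompt (convert_prompt prompt)

-- ===== LEMMAS AND PROOFS =====

-- both programs produce the system message followed by this canonical interleaving
def pvPairMsgs (item : List (String × String)) : List (List (String × Option String)) :=
  [pvUserMsg item, pvAnsMsg item]

-- loop invariant for A: having processed the prefix `pre`, the remaining iterations
-- append exactly the pair list for the suffix, minus its last (assistant) entry.
theorem pvLoopA_eq (suf : List (List (String × String))) :
    ∀ (pre : List (List (String × String))) (acc : List (List (String × Option String))),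
    (PySem.List.pyRange (pre.length : Int) ((pre ++ suf).length : Int) 1).foldl (pvStepA (pre ++ suf)) acc
      = acc ++ (suf.flatMap pvPairMsgs).dropLast := by
  induction suf with
  | nil => intro pre acc; simp [PySem.List.pyRange_one_eq_nil]
  | cons x rest ih =>
    intro pre acc
    rw [PySem.List.pyRange_one_cons (by simp)]
    have hget : PySem.List.pyGet? (pre ++ x :: rest) (pre.length : Int) = some x := by
      simp
    have hstep : pvStepA (pre ++ x :: rest) acc (pre.length : Int)
        = acc ++ [pvUserMsg x] ++ (if rest = [] then [] else [pvAnsMsg x]) := by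
      simp only [pvStepA, hget, Option.getD_some, pvUserMsg, pvAnsMsg]
      rcases rest with _ | ⟨y, ys⟩ <;> simp
    rw [List.foldl_cons, hstep]
    have hpre : ((pre.length : Int) + 1) = (((pre ++ [x]).length : Int)) := by simp
    have hall : pre ++ x :: rest = (pre ++ [x]) ++ rest := by simp
    rw [hpre, hall, ih (pre ++ [x])]
    rcases rest with _ | ⟨y, ys⟩
    · simp [pvPairMsgs]
    · have hne : pvPairMsgs y ++ List.flatMap pvPairMsgs ys ≠ [] := by simp [pvPairMsgs]
      simp only [List.flatMap_cons, if_neg (by simp : ¬(y :: ys = []))]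
      rw [List.dropLast_append_of_ne_nil hne]
      simp [pvPairMsgs]

-- B's zip-then-append assembly equals the same canonical interleaving
theorem pvZip_eq (prompt : List (List (String × String))) :
    ((prompt.map pvUserMsg).zip (prompt.dropLast.map pvAnsMsg)).flatMap (fun p => [p.1, p.2])
      ++ (prompt.getLast?.map pvUserMsg).toList
      = (prompt.flatMap pvPairMsgs).dropLast := by
  induction prompt with
  | nil => simp
  | cons x rest ih =>
    rcases rest with _ | ⟨y, ys⟩
    · simp [pvPairMsgs]
    · have hne : pvPairMsgs y ++ List.flatMap pvPairMsgs ys ≠ [] := by simp [pvPairMsgs]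
      simp only [List.flatMap_cons, List.dropLast_cons_of_ne_nil (by simp : (y :: ys : List (List (String × String))) ≠ []),
        List.map_cons, List.zip_cons_cons, List.getLast?_cons_cons, List.flatMap_cons] at ih ⊢
      rw [List.dropLast_append_of_ne_nil hne, ← ih]
      simp [pvPairMsgs]

-- ===== VERDICT (by name: the statement is the Claim_ definition above) =====
theorem convert_prompt_spec : Claim_equal_convert_prompt := by
  intro prompt _
  unfold Spec_convert_prompt convert_prompt convert_prompt_alt
  have hA := pvLoopA_eq prompt [] [pvSystemMsg]
  simp only [List.nil_append, List.length_nil, Nat.cast_zero] at hA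
  rw [hA]
  simp only [PySem.List.slice_to_neg_one, PySem.List.foldl_append_eq_flatMap,
    PySem.List.pyGet?_neg_one]
  rw [← pvZip_eq prompt]
  rcases prompt with _ | ⟨x, xs⟩
  · simp
  · simp
    refine ⟨(x :: xs).getLast (by simp), List.getLast?_eq_some_getLast (by simp), ?_⟩
    rw [show pvUserMsg x :: List.map pvUserMsg xs = List.map pvUserMsg (x :: xs) from rfl,
        List.getLast?_map, List.getLast?_eq_some_getLast (by simp)]
    rfl
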